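-- pv_equiv track=rewrite | github.com/mitchins/pinybytecnn | benchmarks/benchmark_1layer_lengths.py | generate_test_texts
-- ===== SOURCE A (Python) =====
-- from typing import List, Dict, Any
--
-- def generate_test_texts(window_size: int = 512) -> Dict[str, str]:
--     """Generate test texts of different lengths relative to window size"""
--
--     base_text = "This is a sample text for benchmarking. It contains various words and phrases that might be considered toxic or non-toxic. We need to test performance across different input lengths to understand how the model scales. "
--
--     # Calculate target lengths
--     half_len = window_size // 2  # 256 bytes
--     full_len = window_size        # 512 bytes
--     double_len = window_size * 2  # 1024 bytes
--     triple_len = window_size * 3  # 1536 bytes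
--
--     texts = {}
--
--     # Generate texts by repeating base text
--     current_text = ""
--     while len(current_text.encode('utf-8')) < triple_len + 100:
--         current_text += base_text
--
--     # Extract texts of target lengths
--     texts["half_window"] = current_text[:half_len//2]  # Rough character estimate
--     texts["full_window"] = current_text[:full_len//2]
--     texts["double_window"] = current_text[:double_len//2]
--     texts["triple_window"] = current_text[:triple_len//2]
--
--     # Add some varied content
--     texts["half_window"] += " Short text for testing."
--     texts["full_window"] += " This is a moderate length text for benchmarking performance."
--     texts["double_window"] += " This is a longer text that exceeds the window size and will test how the model handles truncation or processing of extended content."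
--     texts["triple_window"] += " This is a very long text that significantly exceeds the window size, allowing us to test model performance on extended inputs that require more processing power."
--
--     return texts
-- ===== SOURCE B (Python) =====
-- def generate_test_texts(window_size: int = 512):
--     """Generate test texts of different lengths relative to window size"""
--
--     base_text = "This is a sample text for benchmarking. It contains various words and phrases that might be considered toxic or non-toxic. We need to test performance across different input lengths to understand how the model scales. "
--
--     # base_text is ASCII, so its UTF-8 byte length equals its character length:
--     # the repetition count the growth loop reaches is just a ceiling division.
--     target = window_size * 3 + 100
--     n = -(-target // len(base_text))
--     current_text = base_text * n
--
--     return {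
--         "half_window": current_text[:(window_size // 2) // 2] + " Short text for testing.",
--         "full_window": current_text[:window_size // 2] + " This is a moderate length text for benchmarking performance.",
--         "double_window": current_text[:(window_size * 2) // 2] + " This is a longer text that exceeds the window size and will test how the model handles truncation or processing of extended content.",
--         "triple_window": current_text[:(window_size * 3) // 2] + " This is a very long text that significantly exceeds the window size, allowing us to test model performance on extended inputs that require more processing power.",
--     }
-- ===== Notes on version B (the rewrite author's own statement) =====
-- stated objective: faster
-- what changed: The while-loop that grows the text by repeated concatenation and re-encoding is replaced by a closed-form ceiling division giving the repetition count (base_text is ASCII, so byte length = char length), and the dict is built in one literal with the suffixes already appended instead of four inserts followed by four in-place updates.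
import Mathlib
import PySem

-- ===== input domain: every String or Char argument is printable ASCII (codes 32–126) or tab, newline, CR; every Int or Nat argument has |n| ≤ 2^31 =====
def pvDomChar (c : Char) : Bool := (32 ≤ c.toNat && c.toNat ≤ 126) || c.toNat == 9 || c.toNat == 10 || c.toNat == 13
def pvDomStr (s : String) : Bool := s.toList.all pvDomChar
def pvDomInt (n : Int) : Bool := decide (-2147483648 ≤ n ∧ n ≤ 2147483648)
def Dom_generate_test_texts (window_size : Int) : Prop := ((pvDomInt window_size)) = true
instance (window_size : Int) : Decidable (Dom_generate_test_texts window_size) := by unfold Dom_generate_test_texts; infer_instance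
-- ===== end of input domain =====

-- B replaces A's grow-by-concatenation loop with a closed-form ceiling-division repetition
-- count and builds the dict in one literal (objective: simpler).

-- ===== PORT A =====

-- the module-level base text (shared data constant; both Pythons spell it out literally)
def pvBase : List Char := "This is a sample text for benchmarking. It contains various words and phrases that might be considered toxic or non-toxic. We need to test performance across different input lengths to understand how the model scales. ".toList

set_option maxRecDepth 8192 in
theorem pvBase_length : pvBase.length = 218 := by rfl

-- the while loop: `while len(current_text.encode('utf-8')) < target: current_text += base_text`.
-- pvBase (and hence current_text) is ASCII, so the UTF-8 byte length IS the character count;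
-- the port is exact for this program.
def pvGrow (target : Int) (cur : List Char) : List Char :=
  if (cur.length : Int) < target then pvGrow target (cur ++ pvBase) else cur
termination_by (target - cur.length).toNat
decreasing_by
  simp only [List.length_append, pvBase_length]
  omega

def generate_test_texts (window_size : Int) : List (String × String) :=
  let half_len := PySem.Int.floordiv window_size 2
  let full_len := window_size
  let double_len := window_size * 2
  let triple_len := window_size * 3
  let current_text := pvGrow (triple_len + 100) []
  let texts : PySem.Dict String String := PySem.Dict.empty
  let texts := texts.insert "half_window" (String.ofList (PySem.List.slice current_text none (some (PySem.Int.floordiv half_len 2))))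
  let texts := texts.insert "full_window" (String.ofList (PySem.List.slice current_text none (some (PySem.Int.floordiv full_len 2))))
  let texts := texts.insert "double_window" (String.ofList (PySem.List.slice current_text none (some (PySem.Int.floordiv double_len 2))))
  let texts := texts.insert "triple_window" (String.ofList (PySem.List.slice current_text none (some (PySem.Int.floordiv triple_len 2))))
  let texts := texts.modify "half_window" "" (fun v => v ++ " Short text for testing.")
  let texts := texts.modify "full_window" "" (fun v => v ++ " This is a moderate length text for benchmarking performance.")
  let texts := texts.modify "double_window" "" (fun v => v ++ " This is a longer text that exceeds the window size and will test how the model handles truncation or processing of extended content.")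
  let texts := texts.modify "triple_window" "" (fun v => v ++ " This is a very long text that significantly exceeds the window size, allowing us to test model performance on extended inputs that require more processing power.")
  texts.items

-- ===== PORT B =====

def generate_test_texts_alt (window_size : Int) : List (String × String) :=
  let target := window_size * 3 + 100
  let n := -(PySem.Int.floordiv (-target) (pvBase.length : Int))
  let current_text := PySem.List.pyRepeat pvBase n
  [ ("half_window", String.ofList (PySem.List.slice current_text none (some (PySem.Int.floordiv (PySem.Int.floordiv window_size 2) 2))) ++ " Short text for testing."),
    ("full_window", String.ofList (PySem.List.slice current_text none (some (PySem.Int.floordiv window_size 2))) ++ " This is a moderate length text for benchmarking performance."),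
    ("double_window", String.ofList (PySem.List.slice current_text none (some (PySem.Int.floordiv (window_size * 2) 2))) ++ " This is a longer text that exceeds the window size and will test how the model handles truncation or processing of extended content."),
    ("triple_window", String.ofList (PySem.List.slice current_text none (some (PySem.Int.floordiv (window_size * 3) 2))) ++ " This is a very long text that significantly exceeds the window size, allowing us to test model performance on extended inputs that require more processing power.") ]

-- ===== PRECONDITION & SPEC =====
def Spec_generate_test_texts (window_size : Int) (out : List (String × String)) : Prop := out = generate_test_texts_alt window_size
instance (window_size : Int) (out : List (String × String)) : Decidable (Spec_generate_test_texts window_size out) := by unfold Spec_generate_test_texts; infer_instance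

-- ===== CLAIM (what is proved, stated in full; the proofs are below) =====
def Claim_equal_generate_test_texts : Prop := ∀ (window_size : Int), Dom_generate_test_texts window_size → Spec_generate_test_texts window_size (generate_test_texts window_size)

-- ===== LEMMAS AND PROOFS =====

-- b repeated m times
def pvRep (m : Nat) : List Char := (List.replicate m pvBase).flatten

theorem pvRep_succ (m : Nat) : pvRep (m + 1) = pvRep m ++ pvBase := by
  simp [pvRep, List.replicate_succ']

theorem pvRep_length (m : Nat) : (pvRep m).length = m * 218 := by
  induction m with
  | zero => rfl
  | succ k ih => rw [pvRep_succ]; simp [ih, pvBase_length]; ring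

-- the loop, started on m copies of the base, stops at max m ⌈t/218⌉ copies
theorem pvGrow_rep (t : Int) (m : Nat) :
    pvGrow t (pvRep m) = pvRep (max m (-(PySem.Int.floordiv (-t) 218)).toNat) := by
  have hq := (PySem.Int.neg_floordiv_neg_eq_iff_of_pos (a := t) (b := 218)
      (q := -(PySem.Int.floordiv (-t) 218)) (by omega)).mp rfl
  set q : Int := -(PySem.Int.floordiv (-t) 218) with hqdef
  rw [pvGrow]
  by_cases h : ((pvRep m).length : Int) < t
  · simp only [h, if_true]
    have hm : (m : Int) * 218 < t := by rw [pvRep_length] at h; push_cast at h; omega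
    have hlt : (m : Int) < q := by nlinarith [hq.2]
    rw [← pvRep_succ, pvGrow_rep t (m + 1)]
    congr 1
    omega
  · simp only [h, if_false]
    have hm : t ≤ (m : Int) * 218 := by rw [pvRep_length] at h; push_cast at h; omega
    have hle : q ≤ (m : Int) := by nlinarith [hq.1]
    congr 1
    omega
termination_by ((-(PySem.Int.floordiv (-t) 218)).toNat - m)
decreasing_by
  omega

theorem pvGrow_nil (t : Int) :
    pvGrow t [] = PySem.List.pyRepeat pvBase (-(PySem.Int.floordiv (-t) 218)) := by
  have h := pvGrow_rep t 0
  simpa [pvRep, PySem.List.pyRepeat] using h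

-- ===== VERDICT (by name: the statement is the Claim_ definition above) =====
theorem generate_test_texts_spec : Claim_equal_generate_test_texts := by
  intro w _
  show generate_test_texts w = generate_test_texts_alt w
  simp only [generate_test_texts, generate_test_texts_alt, pvGrow_nil, pvBase_length]
  rfl
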